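-- pv_equiv track=rewrite | github.com/alecacco/KDI-Project-2019-2020-Geospace | models/script/Mountain/get_rifugi.py | gravecleaner
-- ===== SOURCE A (Python) =====
-- def gravecleaner(s):
--     res = s
--
--     replacements = {
--         "&agrave":"à",
--         "&egrave":"è",
--         "&igrave":"ì",
--         "&ograve":"ò",
--         "&ugrave":"ù",
--         "&nbsp":" ",
--         "&copy":""
--     }
--     for k,v in replacements.items():
--         res = res.replace(k,"à")
--
--     return res
-- ===== SOURCE B (Python) =====
-- def gravecleaner(s):
--     # One left-to-right scan: at each position try the seven entity keys;
--     # on a match emit "a-grave" (faithfully reproducing A's bug of mapping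
--     # every entity to "a-grave") and skip past the key, else copy the char.
--     keys = ("&agrave", "&egrave", "&igrave", "&ograve", "&ugrave", "&nbsp", "&copy")
--     out = []
--     i = 0
--     n = len(s)
--     while i < n:
--         for k in keys:
--             if s.startswith(k, i):
--                 out.append("\u00e0")
--                 i += len(k)
--                 break
--         else:
--             out.append(s[i])
--             i += 1
--     return "".join(out)
-- ===== Notes on version B (the rewrite author's own statement) =====
-- stated objective: alternative
-- what changed: A makes seven sequential full-string .replace passes (one per entity key); B makes a single left-to-right scan that tries the seven keys at each position and substitutes once, never rescanning its own output.
import Mathlib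
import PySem

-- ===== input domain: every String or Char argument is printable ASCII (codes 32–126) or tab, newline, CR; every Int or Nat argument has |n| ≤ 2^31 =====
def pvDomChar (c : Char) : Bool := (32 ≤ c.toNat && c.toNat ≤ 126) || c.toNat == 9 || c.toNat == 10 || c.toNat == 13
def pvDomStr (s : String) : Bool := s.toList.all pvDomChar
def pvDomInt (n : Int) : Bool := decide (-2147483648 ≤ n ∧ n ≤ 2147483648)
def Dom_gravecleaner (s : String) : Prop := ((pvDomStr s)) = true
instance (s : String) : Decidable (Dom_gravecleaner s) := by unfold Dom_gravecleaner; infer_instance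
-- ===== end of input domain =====

-- B replaces A's seven sequential full-string .replace passes by one left-to-right scan
-- that tries the seven entity keys at each position (objective: alternative single-pass algorithm).

-- ===== PORT A =====
-- A builds a dict of seven replacements and then, for each (k,v) pair in insertion order,
-- runs res = res.replace(k, "à")  (A's quirk, kept: it always substitutes "à", ignoring v).
def gravecleaner (s : String) : String :=
  let res := s
  let replacements : PySem.Dict String String :=
    ((((((((PySem.Dict.empty : PySem.Dict String String).insert "&agrave" "à").insert
      "&egrave" "è").insert "&igrave" "ì").insert "&ograve" "ò").insert
      "&ugrave" "ù").insert "&nbsp" " ").insert "&copy" "")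
  replacements.items.foldl (fun res kv => PySem.Str.replace res kv.1 "à") res

-- ===== PORT B =====
-- the seven entity keys, in Source B's tuple order
def pvKeys : List (List Char) :=
  ["&agrave".toList, "&egrave".toList, "&igrave".toList, "&ograve".toList,
   "&ugrave".toList, "&nbsp".toList, "&copy".toList]

-- Source B's while-loop over positions: at each position try the keys (the inner for/break is
-- the find?); on a match emit 'à' and skip past the key, else copy the char. fuel =
-- remaining length is only a totality guard (each step consumes at least one character).
def pvScanGo : Nat → List Char → List Char
  | 0, u => u
  | _ + 1, [] => []
  | fuel + 1, c :: t =>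
    match pvKeys.find? (fun k => k.isPrefixOf (c :: t)) with
    | some k => 'à' :: pvScanGo fuel (List.drop (k.length - 1) t)
    | none => c :: pvScanGo fuel t

def gravecleaner_alt (s : String) : String :=
  String.ofList (pvScanGo s.toList.length s.toList)

-- ===== PRECONDITION & SPEC =====
def Spec_gravecleaner (s : String) (out : String) : Prop := out = gravecleaner_alt s
instance (s : String) (out : String) : Decidable (Spec_gravecleaner s out) := by unfold Spec_gravecleaner; infer_instance

-- ===== CLAIM (what is proved, stated in full; the proofs are below) =====
def Claim_equal_gravecleaner : Prop := ∀ (s : String), Dom_gravecleaner s → Spec_gravecleaner s (gravecleaner s)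

-- ===== LEMMAS AND PROOFS =====

-- proof helper: a single-key scan (what one pass of Python's str.replace(k, "à") computes)
def pvScanOne (k : List Char) : List Char → List Char
  | [] => []
  | c :: t =>
    if k.isPrefixOf (c :: t) then 'à' :: pvScanOne k (List.drop (k.length - 1) t)
    else c :: pvScanOne k t
termination_by u => u.length
decreasing_by
  all_goals simp

-- proof helper: the simultaneous scan over an arbitrary key list (pvScanGo without fuel,
-- generalized over the key list so the key-peeling lemma pvInter can recurse)
def pvScanS (ks : List (List Char)) : List Char → List Char
  | [] => []
  | c :: t =>
    match ks.find? (fun k => k.isPrefixOf (c :: t)) with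
    | some k => 'à' :: pvScanS ks (List.drop (k.length - 1) t)
    | none => c :: pvScanS ks t
termination_by u => u.length
decreasing_by
  all_goals simp

-- the structural facts about the seven keys that the equivalence rests on
lemma pvKeysFacts : ∀ k ∈ pvKeys,
    k.head? = some '&' ∧ '&' ∉ k.tail ∧ 'à' ∉ k ∧ 2 ≤ k.length := by decide

lemma pvHeadOfPrefix {k v : List Char} (h : k <+: v) (hh : k.head? = some '&') :
    v.head? = some '&' := by
  obtain ⟨r, rfl⟩ := h
  cases k with
  | nil => simp at hh
  | cons a l => simpa using hh

-- PySem.Chars.replace.go with enough fuel is the single-key scan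
lemma pvGoSpec (k : List Char) (hk : k ≠ []) :
    ∀ (fuel : Nat) (u acc : List Char), u.length ≤ fuel →
      PySem.Chars.replace.go k ['à'] fuel u acc = acc.reverse ++ pvScanOne k u := by
  intro fuel
  induction fuel with
  | zero =>
    intro u acc h
    have : u = [] := List.eq_nil_of_length_eq_zero (Nat.le_zero.mp h)
    subst this
    simp [PySem.Chars.replace.go, pvScanOne]
  | succ n ih =>
    intro u acc h
    match u with
    | [] => simp [PySem.Chars.replace.go, pvScanOne]
    | c :: t =>
      rw [PySem.Chars.replace.go]
      by_cases hp : k.isPrefixOf (c :: t)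
      · have hklen : 1 ≤ k.length := by
          cases k with
          | nil => exact absurd rfl hk
          | cons a l => simp
        have hdrop : List.drop k.length (c :: t) = List.drop (k.length - 1) t := by
          obtain ⟨m, hm⟩ : ∃ m, k.length = m + 1 := ⟨k.length - 1, by omega⟩
          simp [hm]
        rw [if_pos hp, hdrop, ih _ _ (by simp at h ⊢; omega)]
        rw [pvScanOne, if_pos hp]
        simp
      · rw [if_neg hp, ih _ _ (by simp at h ⊢; omega)]
        rw [pvScanOne, if_neg hp]
        simp

-- one pass of Python's res.replace(k, "à") is the single-key scan
lemma pvReplaceEq (k : List Char) (hk : k ≠ []) (u : List Char) :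
    PySem.Chars.replace u k ['à'] = pvScanOne k u := by
  have he : k.isEmpty = false := by cases k <;> simp_all
  rw [PySem.Chars.replace, he]
  simpa using pvGoSpec k hk u.length u [] le_rfl

-- find? congruence on the members of the list
lemma pvFindCongr {α : Type} (p q : α → Bool) (l : List α)
    (h : ∀ a ∈ l, p a = q a) : l.find? p = l.find? q := by
  induction l with
  | nil => rfl
  | cons a t ih =>
    have ha := h a (by simp)
    by_cases hp : p a
    · rw [List.find?_cons_of_pos hp, List.find?_cons_of_pos (ha ▸ hp)]
    · rw [List.find?_cons_of_neg hp, List.find?_cons_of_neg (by rw [← ha]; exact hp),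
        ih (fun a ha' => h a (by simp [ha']))]

-- a nonempty pattern without '&' and without 'à' is a prefix of the scanned text
-- iff it is a prefix of the original text (every key starts with '&'; the scan only
-- inserts 'à' and only consumes regions starting with '&')
lemma pvPreserve (k : List Char) (hkh : k.head? = some '&') :
    ∀ (t w : List Char), w ≠ [] → '&' ∉ w → 'à' ∉ w →
      (w <+: pvScanOne k t ↔ w <+: t) := by
  intro t
  induction t with
  | nil => intro w hw _ _; simp [pvScanOne, List.prefix_nil, hw]
  | cons c t ih =>
    intro w hw hamp hgr
    match w, hw with
    | w0 :: w', _ =>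
      by_cases hp : k.isPrefixOf (c :: t)
      · have hpre : k <+: c :: t := List.isPrefixOf_iff_prefix.mp hp
        have hc : c = '&' := by
          have := pvHeadOfPrefix hpre hkh
          simpa using this
        rw [pvScanOne, if_pos hp]
        constructor
        · intro hx
          rw [List.cons_prefix_cons] at hx
          exact absurd (hx.1 ▸ List.mem_cons_self) hgr
        · intro hx
          rw [List.cons_prefix_cons] at hx
          exact absurd ((hx.1.trans hc) ▸ List.mem_cons_self) hamp
      · rw [pvScanOne, if_neg hp]
        rw [List.cons_prefix_cons, List.cons_prefix_cons]
        refine and_congr_right fun _ => ?_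
        match w' with
        | [] => simp
        | v0 :: v' =>
          exact ih (v0 :: v') (by simp) (fun hm => hamp (List.mem_cons_of_mem _ hm))
            (fun hm => hgr (List.mem_cons_of_mem _ hm))

-- the single-key scan copies verbatim any region in which the key never matches
lemma pvSkip (k : List Char) :
    ∀ (m : Nat) (u : List Char), m ≤ u.length →
      (∀ i < m, ¬ k <+: u.drop i) →
      pvScanOne k u = u.take m ++ pvScanOne k (u.drop m) := by
  intro m
  induction m with
  | zero => intro u _ _; simp
  | succ n ih =>
    intro u hlen hno
    match u with
    | [] => simp at hlen
    | c :: t =>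
      have h0 : ¬ k <+: c :: t := by simpa using hno 0 (Nat.succ_pos n)
      have hp : ¬ k.isPrefixOf (c :: t) = true := fun h =>
        h0 (List.isPrefixOf_iff_prefix.mp h)
      rw [pvScanOne, if_neg hp]
      rw [ih t (by simp at hlen; omega) (fun i hi => by
        simpa using hno (i + 1) (by omega))]
      simp

-- peeling one key off the simultaneous scan = running one sequential replace pass first
lemma pvInter (k : List Char) (ks : List (List Char)) (hk : k ∈ pvKeys)
    (hks : ∀ j ∈ ks, j ∈ pvKeys) :
    ∀ (n : Nat) (u : List Char), u.length ≤ n →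
      pvScanS (k :: ks) u = pvScanS ks (pvScanOne k u) := by
  obtain ⟨hkh, hktail, hkgr, hklen⟩ := pvKeysFacts k hk
  intro n
  induction n with
  | zero =>
    intro u h
    have : u = [] := List.eq_nil_of_length_eq_zero (Nat.le_zero.mp h)
    subst this; simp [pvScanS, pvScanOne]
  | succ n ih =>
    intro u hlen
    match u with
    | [] => simp [pvScanS, pvScanOne]
    | c :: t =>
      by_cases hp : k.isPrefixOf (c :: t)
      · -- the head key matches: both sides emit 'à' and continue past the key
        rw [pvScanS, pvScanOne, if_pos hp, pvScanS]
        have hnone : ks.find? (fun j => j.isPrefixOf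
            ('à' :: pvScanOne k (List.drop (k.length - 1) t))) = none := by
          rw [List.find?_eq_none]
          intro j hj hjp
          obtain ⟨hjh, -, -, -⟩ := pvKeysFacts j (hks j hj)
          have h1 := pvHeadOfPrefix (List.isPrefixOf_iff_prefix.mp hjp) hjh
          simp at h1
        simp only [List.find?_cons_of_pos (p := fun j => j.isPrefixOf (c :: t)) (l := ks) hp,
          hnone]
        exact congrArg _ (ih (List.drop (k.length - 1) t) (by simp at hlen ⊢; omega))
      · -- the head key does not match: the per-position key tests agree on both texts
        have hpre : ¬ k <+: c :: t := fun h => hp (List.isPrefixOf_iff_prefix.mpr h)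
        rw [pvScanS, pvScanOne, if_neg hp, pvScanS]
        have hcongr : ks.find? (fun j => j.isPrefixOf (c :: pvScanOne k t)) =
            ks.find? (fun j => j.isPrefixOf (c :: t)) := by
          apply pvFindCongr
          intro j hj
          obtain ⟨hjh, hjtail, hjgr, hjlen⟩ := pvKeysFacts j (hks j hj)
          match j, hjlen with
          | j0 :: j1 :: j', _ =>
            have hiff := pvPreserve k hkh t (j1 :: j') (by simp)
              (by simpa using hjtail) (fun hm => hjgr (List.mem_cons_of_mem _ hm))
            rw [Bool.eq_iff_iff]
            simp only [List.isPrefixOf_iff_prefix, List.cons_prefix_cons]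
            exact and_congr_right fun _ => hiff
        simp only [List.find?_cons_of_neg (p := fun j => j.isPrefixOf (c :: t)) (l := ks) hp,
          hcongr]
        cases hfind : ks.find? (fun j => j.isPrefixOf (c :: t)) with
        | none =>
          exact congrArg _ (ih t (by simp at hlen; omega))
        | some j =>
          have hjks : j ∈ ks := List.mem_of_find?_eq_some hfind
          obtain ⟨hjh, hjtail, hjgr, hjlen⟩ := pvKeysFacts j (hks j hjks)
          have hjp2 : j.isPrefixOf (c :: t) = true := by simpa using List.find?_some hfind
          have hjpre : j <+: c :: t := List.isPrefixOf_iff_prefix.mp hjp2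
          match j, hjlen, hjpre, hjtail with
          | j0 :: jt, hjlen, hjpre, hjtail =>
            have hjt : jt <+: t := (List.cons_prefix_cons.mp hjpre).2
            have hm : jt.length ≤ t.length := hjt.length_le
            have hno : ∀ i < jt.length, ¬ k <+: t.drop i := by
              intro i hi hk'
              have h1 : (t.drop i).head? = some '&' := pvHeadOfPrefix hk' hkh
              rw [List.head?_drop] at h1
              have hit : i < t.length := hi.trans_le hm
              rw [List.getElem?_eq_getElem hit] at h1
              have h2 : jt[i] = '&' := by
                rw [List.IsPrefix.getElem hjt hi]
                exact Option.some.inj h1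
              have hamp : '&' ∉ jt := by simpa using hjtail
              exact hamp (h2 ▸ List.getElem_mem hi)
            have hskip : pvScanOne k t =
                t.take jt.length ++ pvScanOne k (t.drop jt.length) :=
              pvSkip k jt.length t hm hno
            have hlt : (t.take jt.length).length = jt.length :=
              List.length_take_of_le hm
            have hdl := List.drop_left (l₁ := List.take jt.length t)
              (l₂ := pvScanOne k (List.drop jt.length t))
            rw [hlt] at hdl
            have hdropeq : List.drop ((j0 :: jt).length - 1) (pvScanOne k t) =
                pvScanOne k (List.drop ((j0 :: jt).length - 1) t) := by
              simp only [List.length_cons, Nat.add_sub_cancel]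
              rw [hskip]
              exact hdl
            show 'à' :: pvScanS (k :: ks) (List.drop ((j0 :: jt).length - 1) t) =
              'à' :: pvScanS ks (List.drop ((j0 :: jt).length - 1) (pvScanOne k t))
            rw [hdropeq]
            exact congrArg _ (ih (List.drop ((j0 :: jt).length - 1) t)
              (by simp at hlen ⊢; omega))

-- the simultaneous scan with no keys is the identity
lemma pvScanSNil : ∀ u, pvScanS [] u = u := by
  intro u
  induction u with
  | nil => simp [pvScanS]
  | cons c t ih => rw [pvScanS]; simp [ih]

-- the fueled scan of port B is the simultaneous scan over the seven keys
lemma pvScanGoEq : ∀ (fuel : Nat) (u : List Char), u.length ≤ fuel →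
    pvScanGo fuel u = pvScanS pvKeys u := by
  intro fuel
  induction fuel with
  | zero =>
    intro u h
    have : u = [] := List.eq_nil_of_length_eq_zero (Nat.le_zero.mp h)
    subst this; simp [pvScanGo, pvScanS]
  | succ n ih =>
    intro u hlen
    match u with
    | [] => simp [pvScanGo, pvScanS]
    | c :: t =>
      rw [pvScanGo, pvScanS]
      cases hfind : pvKeys.find? (fun k => k.isPrefixOf (c :: t)) with
      | none => exact congrArg _ (ih t (by simp at hlen; omega))
      | some k => exact congrArg _ (ih _ (by simp at hlen ⊢; omega))

-- A's seven-pass chain equals the simultaneous scan, on the character-list level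
lemma pvChainEq (u : List Char) :
    pvScanOne "&copy".toList (pvScanOne "&nbsp".toList (pvScanOne "&ugrave".toList
      (pvScanOne "&ograve".toList (pvScanOne "&igrave".toList (pvScanOne "&egrave".toList
        (pvScanOne "&agrave".toList u)))))) = pvScanS pvKeys u := by
  have step : ∀ (k : List Char) (ks : List (List Char)), k ∈ pvKeys →
      (∀ j ∈ ks, j ∈ pvKeys) → ∀ v, pvScanS (k :: ks) v = pvScanS ks (pvScanOne k v) :=
    fun k ks hk hks v => pvInter k ks hk hks v.length v le_rfl
  show _ = pvScanS ["&agrave".toList, "&egrave".toList, "&igrave".toList,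
    "&ograve".toList, "&ugrave".toList, "&nbsp".toList, "&copy".toList] u
  rw [step _ _ (by decide) (by decide), step _ _ (by decide) (by decide),
    step _ _ (by decide) (by decide), step _ _ (by decide) (by decide),
    step _ _ (by decide) (by decide), step _ _ (by decide) (by decide),
    step _ _ (by decide) (by decide), pvScanSNil]

-- ===== VERDICT (by name: the statement is the Claim_ definition above) =====
theorem gravecleaner_spec : Claim_equal_gravecleaner := by
  intro s _
  unfold Spec_gravecleaner gravecleaner gravecleaner_alt
  dsimp only
  have hitems : ((((((((PySem.Dict.empty : PySem.Dict String String).insert "&agrave" "à").insert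
      "&egrave" "è").insert "&igrave" "ì").insert "&ograve" "ò").insert
      "&ugrave" "ù").insert "&nbsp" " ").insert "&copy" "").items =
      [("&agrave", "à"), ("&egrave", "è"), ("&igrave", "ì"), ("&ograve", "ò"),
       ("&ugrave", "ù"), ("&nbsp", " "), ("&copy", "")] := by decide
  rw [hitems]
  simp only [List.foldl]
  simp only [PySem.Str.replace, String.toList_ofList]
  rw [show ("à".toList) = ['à'] from by decide]
  rw [pvReplaceEq _ (by decide), pvReplaceEq _ (by decide), pvReplaceEq _ (by decide),
    pvReplaceEq _ (by decide), pvReplaceEq _ (by decide), pvReplaceEq _ (by decide),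
    pvReplaceEq _ (by decide)]
  rw [pvScanGoEq s.toList.length s.toList le_rfl]
  rw [pvChainEq]
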